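-- pv_equiv track=rewrite | github.com/sai-barath/case-closed-starter-code | data_collector.py | calculate_voronoi_metrics
-- ===== SOURCE A (Python) =====
-- from collections import deque
--
-- BOARD_HEIGHT = 18
--
-- BOARD_WIDTH = 20
--
-- def calculate_voronoi_metrics(agent1_trail, agent2_trail):
--     visited = {}
--     queue = deque()
--
--     if not agent1_trail or not agent2_trail:
--         return 0, 0, 0, 0
--
--     a1_head = agent1_trail[-1]
--     a2_head = agent2_trail[-1]
--
--     occupied = set(agent1_trail) | set(agent2_trail)
--
--     queue.append((a1_head, 1))
--     queue.append((a2_head, 2))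
--     visited[a1_head] = 1
--     visited[a2_head] = 2
--
--     while queue:
--         (x, y), owner = queue.popleft()
--
--         for dx, dy in [(0, 1), (0, -1), (1, 0), (-1, 0)]:
--             nx = (x + dx) % BOARD_WIDTH
--             ny = (y + dy) % BOARD_HEIGHT
--             npos = (nx, ny)
--
--             if npos in occupied or npos in visited:
--                 continue
--
--             visited[npos] = owner
--             queue.append((npos, owner))
--
--     p1_nodes = sum(1 for v in visited.values() if v == 1)
--     p2_nodes = sum(1 for v in visited.values() if v == 2)
--
--     p1_edges = 0
--     p2_edges = 0
--
--     for (x, y), owner in visited.items():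
--         for dx, dy in [(0, 1), (0, -1), (1, 0), (-1, 0)]:
--             nx = (x + dx) % BOARD_WIDTH
--             ny = (y + dy) % BOARD_HEIGHT
--             npos = (nx, ny)
--
--             if npos not in occupied and npos not in visited:
--                 if owner == 1:
--                     p1_edges += 1
--                 elif owner == 2:
--                     p2_edges += 1
--
--     return p1_nodes, p2_nodes, p1_edges, p2_edges
-- ===== SOURCE B (Python) =====
-- BOARD_HEIGHT = 18
-- BOARD_WIDTH = 20
--
-- _DIRS = [(0, 1), (0, -1), (1, 0), (-1, 0)]
--
--
-- def calculate_voronoi_metrics(agent1_trail, agent2_trail):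
--     if not agent1_trail or not agent2_trail:
--         return 0, 0, 0, 0
--
--     a1_head = agent1_trail[-1]
--     a2_head = agent2_trail[-1]
--     occupied = set(agent1_trail) | set(agent2_trail)
--
--     # level-synchronous BFS: two per-owner frontiers per round, agent 1 expands first
--     if a1_head == a2_head:
--         region1, region2 = [], [a1_head]
--     else:
--         region1, region2 = [a1_head], [a2_head]
--     seen = {a1_head, a2_head}
--     f1, f2 = [a1_head], [a2_head]
--
--     while f1 or f2:
--         nf1, nf2 = [], []
--         for frontier, region, nf in ((f1, region1, nf1), (f2, region2, nf2)):
--             for (x, y) in frontier: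
--                 for dx, dy in _DIRS:
--                     np = ((x + dx) % BOARD_WIDTH, (y + dy) % BOARD_HEIGHT)
--                     if np not in occupied and np not in seen:
--                         seen.add(np)
--                         region.append(np)
--                         nf.append(np)
--         f1, f2 = nf1, nf2
--
--     def free_degree(cell):
--         x, y = cell
--         deg = 0
--         for dx, dy in _DIRS:
--             np = ((x + dx) % BOARD_WIDTH, (y + dy) % BOARD_HEIGHT)
--             if np not in occupied and np not in seen:
--                 deg += 1
--         return deg
--
--     p1_edges = sum(free_degree(c) for c in region1)
--     p2_edges = sum(free_degree(c) for c in region2)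
--     return len(region1), len(region2), p1_edges, p2_edges
-- ===== Notes on version B (the rewrite author's own statement) =====
-- stated objective: alternative
-- what changed: replaces the owner-tagged FIFO deque feeding an owner dict plus two post-hoc counting passes over the dict by a level-synchronous BFS that keeps two per-owner frontiers expanded in order (agent 1 first, preserving the tie-break), an explicit seen-set and per-owner region lists, so node counts are region lengths and edge counts are summed region by region
import Mathlib
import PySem

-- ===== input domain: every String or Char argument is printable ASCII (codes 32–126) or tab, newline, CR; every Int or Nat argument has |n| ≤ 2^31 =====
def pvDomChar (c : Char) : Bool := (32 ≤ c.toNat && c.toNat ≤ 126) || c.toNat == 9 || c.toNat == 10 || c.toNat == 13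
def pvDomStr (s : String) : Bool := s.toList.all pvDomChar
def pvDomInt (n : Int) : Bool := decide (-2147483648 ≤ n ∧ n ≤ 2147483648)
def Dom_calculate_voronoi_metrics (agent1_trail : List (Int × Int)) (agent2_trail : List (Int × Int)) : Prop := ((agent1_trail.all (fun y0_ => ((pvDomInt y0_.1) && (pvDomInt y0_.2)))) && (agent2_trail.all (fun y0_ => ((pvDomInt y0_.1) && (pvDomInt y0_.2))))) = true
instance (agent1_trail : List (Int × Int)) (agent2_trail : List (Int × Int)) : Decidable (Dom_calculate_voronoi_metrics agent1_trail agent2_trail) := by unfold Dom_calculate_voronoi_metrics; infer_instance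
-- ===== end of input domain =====

-- B replaces A's owner-tagged FIFO-deque BFS with owner dict and post-hoc counting passes by a
-- level-synchronous BFS with two per-owner frontiers (agent 1 expanded first each round), a
-- seen-set and per-owner region lists; same return value, similar cost (objective: alternative).

-- ===== PORT A =====
-- helpers shared by the termination measures of both ports
def pvBoard : List (Int × Int) :=
  (List.range 360).map (fun k => (((k % 20 : Nat) : Int), ((k / 20 : Nat) : Int)))

def pvUnvisD (v : PySem.Dict (Int × Int) Int) : Nat :=
  (pvBoard.filter (fun c => !(v.contains c))).length

def pvUnvisS (s : PySem.Set (Int × Int)) : Nat :=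
  (pvBoard.filter (fun c => !(PySem.Set.contains s c))).length

lemma pv_filter_le {α : Type} (p q : α → Bool) (hpq : ∀ a, q a = true → p a = true) :
    ∀ l : List α, (l.filter q).length ≤ (l.filter p).length := by
  intro l
  induction l with
  | nil => simp
  | cons a t ih =>
    by_cases hq : q a
    · simp [hq, hpq a hq]; omega
    · simp only [List.filter_cons, hq, Bool.false_eq_true, if_false]
      by_cases hp : p a <;> simp [hp] <;> omega

lemma pv_filter_lt {α : Type} (p q : α → Bool) (hpq : ∀ a, q a = true → p a = true)
    (x : α) (hp : p x = true) (hq : q x = false) :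
    ∀ l : List α, x ∈ l → (l.filter q).length < (l.filter p).length := by
  intro l hl
  induction l with
  | nil => cases hl
  | cons a t ih =>
    rcases List.mem_cons.mp hl with rfl | hmem
    · have := pv_filter_le p q hpq t
      simp [hp, hq]; omega
    · by_cases hqa : q a
      · simp [hqa, hpq a hqa]; exact ih hmem
      · simp only [List.filter_cons, hqa, Bool.false_eq_true, if_false]
        by_cases hpa : p a
        · simp [hpa]; have := ih hmem; omega
        · simp [hpa]; exact ih hmem

lemma mem_pvBoard (a b : Int) (h1 : 0 ≤ a) (h2 : a < 20) (h3 : 0 ≤ b) (h4 : b < 18) :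
    (a, b) ∈ pvBoard := by
  rw [pvBoard, List.mem_map]
  refine ⟨a.toNat + 20 * b.toNat, ?_, ?_⟩
  · exact List.mem_range.mpr (by omega)
  · rw [Prod.ext_iff]
    constructor <;> simp <;> omega

def pvDirsA : List (Int × Int) := [(0, 1), (0, -1), (1, 0), (-1, 0)]

def pvNbrA (x y dx dy : Int) : Int × Int :=
  (PySem.Int.mod (x + dx) 20, PySem.Int.mod (y + dy) 18)

lemma pvNbrA_mem_board (x y dx dy : Int) : pvNbrA x y dx dy ∈ pvBoard := by
  exact mem_pvBoard _ _ (PySem.Int.mod_nonneg _ (by norm_num))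
    (PySem.Int.mod_lt _ (by norm_num)) (PySem.Int.mod_nonneg _ (by norm_num))
    (PySem.Int.mod_lt _ (by norm_num))

lemma pvUnvisD_insert (v : PySem.Dict (Int × Int) Int) (np : Int × Int) (o : Int)
    (h : v.contains np = false) (hb : np ∈ pvBoard) :
    pvUnvisD (v.insert np o) < pvUnvisD v := by
  refine pv_filter_lt _ _ ?_ np ?_ ?_ pvBoard hb
  · intro a ha
    simp only [Bool.not_eq_true', PySem.Dict.contains_insert] at ha ⊢
    exact (Bool.or_eq_false_iff.mp ha).2
  · simp [h]
  · simp [PySem.Dict.contains_insert_self]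

-- expansion of the four neighbours of one dequeued cell (the inner `for dx, dy in …` loop of A)
def pvExpandA (occ : PySem.Set (Int × Int)) (x y : Int) (owner : Int) :
    List (Int × Int) → PySem.Dict (Int × Int) Int → List ((Int × Int) × Int) →
    PySem.Dict (Int × Int) Int × List ((Int × Int) × Int)
  | [], v, q => (v, q)
  | (dx, dy) :: ds, v, q =>
    let np := pvNbrA x y dx dy
    if PySem.Set.contains occ np || v.contains np then
      pvExpandA occ x y owner ds v q
    else
      pvExpandA occ x y owner ds (v.insert np owner) (q ++ [(np, owner)])

lemma pvExpandA_measure (occ : PySem.Set (Int × Int)) (x y o : Int) :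
    ∀ (ds : List (Int × Int)) (v : PySem.Dict (Int × Int) Int) (q : List ((Int × Int) × Int)),
      (pvExpandA occ x y o ds v q).2.length + 2 * pvUnvisD (pvExpandA occ x y o ds v q).1 ≤
        q.length + 2 * pvUnvisD v := by
  intro ds
  induction ds with
  | nil => intro v q; simp [pvExpandA]
  | cons d ds ih =>
    intro v q
    obtain ⟨dx, dy⟩ := d
    simp only [pvExpandA]
    split
    · exact ih v q
    · rename_i hg
      have hc : v.contains (pvNbrA x y dx dy) = false := by
        rcases Bool.or_eq_false_iff.mp (Bool.eq_false_iff.mpr hg) with ⟨_, h2⟩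
        exact h2
      have hlt := pvUnvisD_insert v (pvNbrA x y dx dy) o hc (pvNbrA_mem_board x y dx dy)
      have hih := ih (v.insert (pvNbrA x y dx dy) o) (q ++ [(pvNbrA x y dx dy, o)])
      simp only [List.length_append, List.length_cons, List.length_nil] at hih ⊢
      omega

-- the `while queue:` loop of A (deque as a list, popleft at the head, appends at the tail)
def pvLoopA (occ : PySem.Set (Int × Int)) :
    PySem.Dict (Int × Int) Int → List ((Int × Int) × Int) → PySem.Dict (Int × Int) Int
  | v, [] => v
  | v, ((x, y), owner) :: rest =>
    let r := pvExpandA occ x y owner pvDirsA v rest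
    pvLoopA occ r.1 r.2
termination_by v q => q.length + 2 * pvUnvisD v
decreasing_by
  have := pvExpandA_measure occ x y owner pvDirsA v rest
  simp only [List.length_cons]
  omega

def calculate_voronoi_metrics (agent1_trail : List (Int × Int)) (agent2_trail : List (Int × Int)) : Int × Int × Int × Int :=
  if h : agent1_trail = [] ∨ agent2_trail = [] then (0, 0, 0, 0)
  else
    let a1 := agent1_trail.getLast (fun hh => h (Or.inl hh))
    let a2 := agent2_trail.getLast (fun hh => h (Or.inr hh))
    let occ := PySem.Set.union (PySem.Set.ofList agent1_trail) agent2_trail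
    let v0 := ((PySem.Dict.empty.insert a1 1).insert a2 2 : PySem.Dict (Int × Int) Int)
    let vis := pvLoopA occ v0 [(a1, 1), (a2, 2)]
    let p1n : Int := ((vis.values.filter (fun w => w == 1)).length : Int)
    let p2n : Int := ((vis.values.filter (fun w => w == 2)).length : Int)
    let e := vis.items.foldl (fun (acc : Int × Int) it =>
      pvDirsA.foldl (fun (acc : Int × Int) d =>
        let np := pvNbrA it.1.1 it.1.2 d.1 d.2
        if !(PySem.Set.contains occ np) && !(vis.contains np) then
          (if it.2 == 1 then (acc.1 + 1, acc.2)
           else if it.2 == 2 then (acc.1, acc.2 + 1) else acc)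
        else acc) acc) (0, 0)
    (p1n, p2n, e.1, e.2)

-- ===== PORT B =====
def pvDirsB : List (Int × Int) := [(0, 1), (0, -1), (1, 0), (-1, 0)]

def pvNbrB (x y dx dy : Int) : Int × Int :=
  (PySem.Int.mod (x + dx) 20, PySem.Int.mod (y + dy) 18)

lemma pvNbrB_mem_board (x y dx dy : Int) : pvNbrB x y dx dy ∈ pvBoard :=
  pvNbrA_mem_board x y dx dy

lemma pvUnvisS_add (s : PySem.Set (Int × Int)) (np : Int × Int)
    (h : PySem.Set.contains s np = false) (hb : np ∈ pvBoard) :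
    pvUnvisS (PySem.Set.add s np) < pvUnvisS s := by
  have hnm : np ∉ s := by
    intro hm; rw [(PySem.Set.contains_iff s np).mpr hm] at h; cases h
  refine pv_filter_lt _ _ ?_ np ?_ ?_ pvBoard hb
  · intro a ha
    simp only [Bool.not_eq_true', PySem.Set.contains_eq_listContains] at ha ⊢
    rw [PySem.Set.add_of_not_mem hnm] at ha
    simp only [List.contains_append] at ha
    exact (Bool.or_eq_false_iff.mp ha).1
  · simp only [Bool.not_eq_true']
    exact h
  · have hmm : np ∈ PySem.Set.add s np := (PySem.Set.mem_add _ _ _).mpr (Or.inr rfl)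
    simp [(PySem.Set.contains_iff _ _).mpr hmm]

-- claim the unclaimed free neighbours of one frontier cell (inner `for dx, dy in _DIRS` loop of B)
def pvClaimB (occ : PySem.Set (Int × Int)) (x y : Int) :
    List (Int × Int) → PySem.Set (Int × Int) → List (Int × Int) → List (Int × Int) →
    PySem.Set (Int × Int) × List (Int × Int) × List (Int × Int)
  | [], seen, reg, nf => (seen, reg, nf)
  | (dx, dy) :: ds, seen, reg, nf =>
    let np := pvNbrB x y dx dy
    if PySem.Set.contains occ np || PySem.Set.contains seen np then
      pvClaimB occ x y ds seen reg nf
    else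
      pvClaimB occ x y ds (PySem.Set.add seen np) (reg ++ [np]) (nf ++ [np])

lemma pvClaimB_measure (occ : PySem.Set (Int × Int)) (x y : Int) :
    ∀ (ds : List (Int × Int)) (seen : PySem.Set (Int × Int)) (reg nf : List (Int × Int)),
      (pvClaimB occ x y ds seen reg nf).2.2.length + 2 * pvUnvisS (pvClaimB occ x y ds seen reg nf).1 ≤
        nf.length + 2 * pvUnvisS seen := by
  intro ds
  induction ds with
  | nil => intro seen reg nf; simp [pvClaimB]
  | cons d ds ih =>
    intro seen reg nf
    obtain ⟨dx, dy⟩ := d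
    simp only [pvClaimB]
    split
    · exact ih seen reg nf
    · rename_i hg
      have hc : PySem.Set.contains seen (pvNbrB x y dx dy) = false := by
        rcases Bool.or_eq_false_iff.mp (Bool.eq_false_iff.mpr hg) with ⟨_, h2⟩
        exact h2
      have hlt := pvUnvisS_add seen (pvNbrB x y dx dy) hc (pvNbrB_mem_board x y dx dy)
      have hih := ih (PySem.Set.add seen (pvNbrB x y dx dy)) (reg ++ [pvNbrB x y dx dy]) (nf ++ [pvNbrB x y dx dy])
      simp only [List.length_append, List.length_cons, List.length_nil] at hih ⊢
      omega

-- expand one whole frontier (the `for (x, y) in frontier` loop of B)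
def pvFrontB (occ : PySem.Set (Int × Int)) :
    List (Int × Int) → PySem.Set (Int × Int) → List (Int × Int) → List (Int × Int) →
    PySem.Set (Int × Int) × List (Int × Int) × List (Int × Int)
  | [], seen, reg, nf => (seen, reg, nf)
  | c :: cells, seen, reg, nf =>
    let r := pvClaimB occ c.1 c.2 pvDirsB seen reg nf
    pvFrontB occ cells r.1 r.2.1 r.2.2

lemma pvFrontB_measure (occ : PySem.Set (Int × Int)) :
    ∀ (cells : List (Int × Int)) (seen : PySem.Set (Int × Int)) (reg nf : List (Int × Int)),
      (pvFrontB occ cells seen reg nf).2.2.length + 2 * pvUnvisS (pvFrontB occ cells seen reg nf).1 ≤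
        nf.length + 2 * pvUnvisS seen := by
  intro cells
  induction cells with
  | nil => intro seen reg nf; simp [pvFrontB]
  | cons c cells ih =>
    intro seen reg nf
    simp only [pvFrontB]
    have h1 := pvClaimB_measure occ c.1 c.2 pvDirsB seen reg nf
    have h2 := ih (pvClaimB occ c.1 c.2 pvDirsB seen reg nf).1
      (pvClaimB occ c.1 c.2 pvDirsB seen reg nf).2.1 (pvClaimB occ c.1 c.2 pvDirsB seen reg nf).2.2
    omega

-- the `while f1 or f2:` round loop of B
def pvRoundsB (occ : PySem.Set (Int × Int)) (seen : PySem.Set (Int × Int))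
    (reg1 reg2 f1 f2 : List (Int × Int)) :
    PySem.Set (Int × Int) × List (Int × Int) × List (Int × Int) :=
  if f1.isEmpty && f2.isEmpty then (seen, reg1, reg2)
  else
    let s1 := pvFrontB occ f1 seen reg1 []
    let s2 := pvFrontB occ f2 s1.1 reg2 []
    pvRoundsB occ s2.1 s1.2.1 s2.2.1 s1.2.2 s2.2.2
termination_by f1.length + f2.length + 2 * pvUnvisS seen
decreasing_by
  have m1 := pvFrontB_measure occ f1 seen reg1 []
  have m2 := pvFrontB_measure occ f2 (pvFrontB occ f1 seen reg1 []).1 reg2 []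
  have hne : 1 ≤ f1.length + f2.length := by
    rename_i hg
    cases f1 <;> cases f2 <;> simp_all <;> omega
  simp only [List.length_nil] at m1 m2
  omega

def pvFreeDegB (occ seen : PySem.Set (Int × Int)) (c : Int × Int) : Int :=
  pvDirsB.foldl (fun (d : Int) dir =>
    let np := pvNbrB c.1 c.2 dir.1 dir.2
    if !(PySem.Set.contains occ np) && !(PySem.Set.contains seen np) then d + 1 else d) 0

def calculate_voronoi_metrics_alt (agent1_trail : List (Int × Int)) (agent2_trail : List (Int × Int)) : Int × Int × Int × Int :=
  if h : agent1_trail = [] ∨ agent2_trail = [] then (0, 0, 0, 0)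
  else
    let a1 := agent1_trail.getLast (fun hh => h (Or.inl hh))
    let a2 := agent2_trail.getLast (fun hh => h (Or.inr hh))
    let occ := PySem.Set.union (PySem.Set.ofList agent1_trail) agent2_trail
    let init : List (Int × Int) × List (Int × Int) :=
      if a1 = a2 then ([], [a1]) else ([a1], [a2])
    let seen0 := PySem.Set.ofList [a1, a2]
    let r := pvRoundsB occ seen0 init.1 init.2 [a1] [a2]
    let p1e := r.2.1.foldl (fun (a : Int) c => a + pvFreeDegB occ r.1 c) 0
    let p2e := r.2.2.foldl (fun (a : Int) c => a + pvFreeDegB occ r.1 c) 0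
    ((r.2.1.length : Int), (r.2.2.length : Int), p1e, p2e)

-- ===== PRECONDITION & SPEC =====
def Spec_calculate_voronoi_metrics (agent1_trail : List (Int × Int)) (agent2_trail : List (Int × Int)) (out : Int × Int × Int × Int) : Prop := out = calculate_voronoi_metrics_alt agent1_trail agent2_trail
instance (agent1_trail : List (Int × Int)) (agent2_trail : List (Int × Int)) (out : Int × Int × Int × Int) : Decidable (Spec_calculate_voronoi_metrics agent1_trail agent2_trail out) := by unfold Spec_calculate_voronoi_metrics; infer_instance

-- ===== CLAIM (what is proved, stated in full; the proofs are below) =====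
def Claim_equal_calculate_voronoi_metrics : Prop := ∀ (agent1_trail : List (Int × Int)) (agent2_trail : List (Int × Int)), Dom_calculate_voronoi_metrics agent1_trail agent2_trail → Spec_calculate_voronoi_metrics agent1_trail agent2_trail (calculate_voronoi_metrics agent1_trail agent2_trail)

-- ===== LEMMAS AND PROOFS =====

lemma pvSetContains_eq {s : PySem.Set (Int × Int)} {c : Int × Int} :
    PySem.Set.contains s c = decide (c ∈ s) := by
  by_cases hc : c ∈ s
  · simp [hc, (PySem.Set.contains_iff s c).mpr hc]
  · simp only [hc, decide_false]
    by_cases hb : PySem.Set.contains s c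
    · exact absurd ((PySem.Set.contains_iff s c).mp hb) hc
    · simpa using hb

lemma pvContains_congr {v : PySem.Dict (Int × Int) Int} {seen : PySem.Set (Int × Int)}
    (h : v.keys = seen) (c : Int × Int) :
    v.contains c = PySem.Set.contains seen c := by
  rw [PySem.Dict.contains_eq_decide_mem_keys, h, pvSetContains_eq]

-- one-cell lockstep simulation: A's 4-neighbour expansion against B's claim step
lemma pvStep_sim (occ : PySem.Set (Int × Int)) (x y o : Int) :
    ∀ (ds : List (Int × Int)) (v : PySem.Dict (Int × Int) Int) (seen : PySem.Set (Int × Int))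
      (reg nf : List (Int × Int)) (q : List ((Int × Int) × Int)),
      v.keys = seen →
      ∃ (new : List (Int × Int)) (vF : PySem.Dict (Int × Int) Int),
        pvExpandA occ x y o ds v q = (vF, q ++ new.map (fun c => (c, o))) ∧
        pvClaimB occ x y ds seen reg nf = (seen ++ new, reg ++ new, nf ++ new) ∧
        vF.items = v.items ++ new.map (fun c => (c, o)) ∧
        vF.keys = seen ++ new := by
  intro ds
  induction ds with
  | nil =>
    intro v seen reg nf q h
    exact ⟨[], v, by simp [pvExpandA], by simp [pvClaimB], by simp, by simp [h]⟩
  | cons d ds ih =>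
    intro v seen reg nf q h
    obtain ⟨dx, dy⟩ := d
    have hnp : pvNbrB x y dx dy = pvNbrA x y dx dy := rfl
    have hguard : v.contains (pvNbrA x y dx dy) = PySem.Set.contains seen (pvNbrA x y dx dy) :=
      pvContains_congr h _
    simp only [pvExpandA, pvClaimB, hnp, hguard]
    split
    · exact ih v seen reg nf q h
    · rename_i hg
      have hsc : PySem.Set.contains seen (pvNbrA x y dx dy) = false := by
        rcases Bool.or_eq_false_iff.mp (Bool.eq_false_iff.mpr hg) with ⟨_, h2⟩
        exact h2
      have hvc : v.contains (pvNbrA x y dx dy) = false := by rw [hguard]; exact hsc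
      have hnsm : pvNbrA x y dx dy ∉ seen := by
        intro hm; rw [(PySem.Set.contains_iff _ _).mpr hm] at hsc; cases hsc
      have hadd : PySem.Set.add seen (pvNbrA x y dx dy) = seen ++ [pvNbrA x y dx dy] :=
        PySem.Set.add_of_not_mem hnsm
      have hkeys' : (v.insert (pvNbrA x y dx dy) o).keys = PySem.Set.add seen (pvNbrA x y dx dy) := by
        rw [PySem.Dict.keys_insert_of_not_contains _ _ hvc, h, hadd]
      obtain ⟨new', vF, h1, h2, h3, h4⟩ := ih (v.insert (pvNbrA x y dx dy) o)
        (PySem.Set.add seen (pvNbrA x y dx dy)) (reg ++ [pvNbrA x y dx dy])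
        (nf ++ [pvNbrA x y dx dy]) (q ++ [(pvNbrA x y dx dy, o)]) hkeys'
      refine ⟨pvNbrA x y dx dy :: new', vF, ?_, ?_, ?_, ?_⟩
      · rw [h1]; simp
      · rw [h2, hadd]; simp
      · rw [h3, PySem.Dict.items_insert_of_not_contains _ _ hvc]; simp
      · rw [h4, hadd]; simp

-- whole-frontier lockstep simulation
lemma pvFront_sim (occ : PySem.Set (Int × Int)) (o : Int) :
    ∀ (cells : List (Int × Int)) (v : PySem.Dict (Int × Int) Int) (seen : PySem.Set (Int × Int))
      (reg nf : List (Int × Int)) (tailq : List ((Int × Int) × Int)),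
      v.keys = seen →
      ∃ (new : List (Int × Int)) (vF : PySem.Dict (Int × Int) Int),
        pvLoopA occ v (cells.map (fun c => (c, o)) ++ tailq) =
          pvLoopA occ vF (tailq ++ new.map (fun c => (c, o))) ∧
        pvFrontB occ cells seen reg nf = (seen ++ new, reg ++ new, nf ++ new) ∧
        vF.items = v.items ++ new.map (fun c => (c, o)) ∧
        vF.keys = seen ++ new := by
  intro cells
  induction cells with
  | nil =>
    intro v seen reg nf tailq h
    exact ⟨[], v, by simp, by simp [pvFrontB], by simp, by simp [h]⟩
  | cons c cells ih =>
    intro v seen reg nf tailq h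
    obtain ⟨cx, cy⟩ := c
    obtain ⟨n1, v1, h1, h2, h3, h4⟩ := pvStep_sim occ cx cy o pvDirsA v seen reg nf
      (cells.map (fun c => (c, o)) ++ tailq) h
    obtain ⟨new', vF, g1, g2, g3, g4⟩ := ih v1 (seen ++ n1) (reg ++ n1) (nf ++ n1)
      (tailq ++ n1.map (fun c => (c, o))) h4
    refine ⟨n1 ++ new', vF, ?_, ?_, ?_, ?_⟩
    · rw [List.map_cons, List.cons_append, pvLoopA]
      simp only [h1, List.append_assoc]
      rw [g1]
      simp [List.append_assoc]
    · simp only [pvFrontB]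
      have hd : pvDirsB = pvDirsA := rfl
      rw [hd, h2]
      simp only []
      rw [g2]
      simp [List.append_assoc]
    · rw [g3, h3]; simp
    · rw [g4]; simp

-- round-by-round simulation of the two loops
lemma pvRounds_sim (occ : PySem.Set (Int × Int)) :
    ∀ (n : ℕ) (seen : PySem.Set (Int × Int)) (reg1 reg2 f1 f2 : List (Int × Int))
      (v : PySem.Dict (Int × Int) Int),
      f1.length + f2.length + 2 * pvUnvisS seen = n →
      v.keys = seen →
      (v.items.filter (fun e => e.2 == (1 : Int))).map (fun e => e.1) = reg1 →
      (v.items.filter (fun e => e.2 == (2 : Int))).map (fun e => e.1) = reg2 →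
      (pvLoopA occ v (f1.map (fun c => (c, (1 : Int))) ++ f2.map (fun c => (c, (2 : Int))))).keys =
          (pvRoundsB occ seen reg1 reg2 f1 f2).1 ∧
        ((pvLoopA occ v (f1.map (fun c => (c, (1 : Int))) ++ f2.map (fun c => (c, (2 : Int))))).items.filter
            (fun e => e.2 == (1 : Int))).map (fun e => e.1) = (pvRoundsB occ seen reg1 reg2 f1 f2).2.1 ∧
        ((pvLoopA occ v (f1.map (fun c => (c, (1 : Int))) ++ f2.map (fun c => (c, (2 : Int))))).items.filter
            (fun e => e.2 == (2 : Int))).map (fun e => e.1) = (pvRoundsB occ seen reg1 reg2 f1 f2).2.2 := by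
  intro n
  induction n using Nat.strong_induction_on with
  | _ n ih =>
    intro seen reg1 reg2 f1 f2 v hn h hr1 hr2
    rw [pvRoundsB]
    by_cases hemp : (f1.isEmpty && f2.isEmpty) = true
    · have hf1 : f1 = [] := by cases f1 <;> simp_all
      have hf2 : f2 = [] := by cases f2 <;> simp_all
      subst hf1; subst hf2
      rw [if_pos hemp]
      simp only [List.map_nil, List.nil_append]
      rw [pvLoopA]
      exact ⟨h, hr1, hr2⟩
    · rw [if_neg hemp]
      obtain ⟨n1, v1, h1, h2, h3, h4⟩ := pvFront_sim occ 1 f1 v seen reg1 []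
        (f2.map (fun c => (c, (2 : Int)))) h
      obtain ⟨n2, v2, g1, g2, g3, g4⟩ := pvFront_sim occ 2 f2 v1 (seen ++ n1) reg2 []
        (n1.map (fun c => (c, (1 : Int)))) h4
      have h2' : pvFrontB occ f1 seen reg1 [] = (seen ++ n1, reg1 ++ n1, n1) := by
        rw [h2]; simp
      have g2' : pvFrontB occ f2 (seen ++ n1) reg2 [] = (seen ++ n1 ++ n2, reg2 ++ n2, n2) := by
        rw [g2]; simp [List.append_assoc]
      have hloop : pvLoopA occ v (f1.map (fun c => (c, (1 : Int))) ++ f2.map (fun c => (c, (2 : Int)))) =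
          pvLoopA occ v2 (n1.map (fun c => (c, (1 : Int))) ++ n2.map (fun c => (c, (2 : Int)))) := by
        rw [h1, g1]
      have m1 := pvFrontB_measure occ f1 seen reg1 []
      have m2 := pvFrontB_measure occ f2 (pvFrontB occ f1 seen reg1 []).1 reg2 []
      rw [h2'] at m2
      have hne : 1 ≤ f1.length + f2.length := by
        cases f1 <;> cases f2 <;> simp_all <;> omega
      have hmeas : n1.length + n2.length + 2 * pvUnvisS (seen ++ n1 ++ n2) < n := by
        rw [h2'] at m1
        rw [g2'] at m2
        simp only [List.length_nil] at m1 m2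
        omega
      have hfil1 : (v2.items.filter (fun e => e.2 == (1 : Int))).map (fun e => e.1) = reg1 ++ n1 := by
        rw [g3, h3]
        simp [List.filter_append, List.filter_map, Function.comp_def, hr1]
      have hfil2 : (v2.items.filter (fun e => e.2 == (2 : Int))).map (fun e => e.1) = reg2 ++ n2 := by
        rw [g3, h3]
        simp [List.filter_append, List.filter_map, Function.comp_def, hr2]
      have hkey2 : v2.keys = seen ++ n1 ++ n2 := by rw [g4]
      obtain ⟨K, R1, R2⟩ := ih _ hmeas (seen ++ n1 ++ n2) (reg1 ++ n1) (reg2 ++ n2) n1 n2 v2 rfl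
        hkey2 hfil1 hfil2
      simp only [h2', g2']
      rw [hloop]
      exact ⟨K, R1, R2⟩

def pvDegA (occ : PySem.Set (Int × Int)) (vis : PySem.Dict (Int × Int) Int) (c : Int × Int) : Int :=
  pvDirsA.foldl (fun (d : Int) dir =>
    let np := pvNbrA c.1 c.2 dir.1 dir.2
    if !(PySem.Set.contains occ np) && !(vis.contains np) then d + 1 else d) 0

lemma pvDeg_congr (occ : PySem.Set (Int × Int)) (vis : PySem.Dict (Int × Int) Int)
    (seen : PySem.Set (Int × Int)) (h : vis.keys = seen) (c : Int × Int) :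
    pvDegA occ vis c = pvFreeDegB occ seen c := by
  unfold pvDegA pvFreeDegB
  have hd : pvDirsB = pvDirsA := rfl
  rw [hd]
  apply List.foldl_ext
  intro a b _
  simp only [pvContains_congr h]
  rfl

lemma pvPair_shift (F : (Int × Int) → Bool) (d1 d2 : Int) :
    ∀ (ds : List (Int × Int)) (acc : Int × Int),
      ds.foldl (fun (acc : Int × Int) d => if F d then (acc.1 + d1, acc.2 + d2) else acc) acc =
        (acc.1 + d1 * (ds.countP F : Int), acc.2 + d2 * (ds.countP F : Int)) := by
  intro ds
  induction ds with
  | nil => intro acc; simp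
  | cons d ds ih =>
    intro acc
    rw [List.foldl_cons]
    by_cases hF : F d
    · rw [if_pos hF, ih, List.countP_cons, if_pos hF]
      rw [Prod.ext_iff]
      constructor <;> simp <;> push_cast <;> ring
    · rw [if_neg hF, ih, List.countP_cons, if_neg hF]
      simp

lemma pvDegA_eq_countP (occ : PySem.Set (Int × Int)) (vis : PySem.Dict (Int × Int) Int) (c : Int × Int) :
    pvDegA occ vis c =
      ((pvDirsA.countP (fun d =>
        !(PySem.Set.contains occ (pvNbrA c.1 c.2 d.1 d.2)) &&
        !(vis.contains (pvNbrA c.1 c.2 d.1 d.2)))) : Int) := by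
  unfold pvDegA
  have hext : pvDirsA.foldl (fun (d : Int) dir =>
      let np := pvNbrA c.1 c.2 dir.1 dir.2
      if !(PySem.Set.contains occ np) && !(vis.contains np) then d + 1 else d) 0 =
      pvDirsA.foldl (fun (acc : Int) x =>
        if (!(PySem.Set.contains occ (pvNbrA c.1 c.2 x.1 x.2)) &&
            !(vis.contains (pvNbrA c.1 c.2 x.1 x.2))) = true then acc + 1 else acc) 0 := by
    apply List.foldl_ext
    intro a b _
    rfl
  rw [hext, PySem.List.foldl_count_if]
  simp

-- A's per-item inner fold over the four directions, in closed form
lemma pvInner_eq (occ : PySem.Set (Int × Int)) (vis : PySem.Dict (Int × Int) Int)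
    (it : (Int × Int) × Int) (acc : Int × Int) :
    pvDirsA.foldl (fun (acc : Int × Int) d =>
      let np := pvNbrA it.1.1 it.1.2 d.1 d.2
      if !(PySem.Set.contains occ np) && !(vis.contains np) then
        (if it.2 == 1 then (acc.1 + 1, acc.2)
         else if it.2 == 2 then (acc.1, acc.2 + 1) else acc)
      else acc) acc =
    (acc.1 + (if it.2 = 1 then pvDegA occ vis it.1 else 0),
     acc.2 + (if it.2 = 2 then pvDegA occ vis it.1 else 0)) := by
  have hstep : ∀ (a : Int × Int),
      (if it.2 == 1 then (a.1 + 1, a.2)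
       else if it.2 == 2 then (a.1, a.2 + 1) else a) =
      (a.1 + (if it.2 = 1 then 1 else 0), a.2 + (if it.2 = 2 then 1 else 0)) := by
    intro a
    by_cases h1 : it.2 = 1
    · simp [h1]
    · by_cases h2 : it.2 = 2 <;> simp [h1, h2]
  have hext : pvDirsA.foldl (fun (acc : Int × Int) d =>
      let np := pvNbrA it.1.1 it.1.2 d.1 d.2
      if !(PySem.Set.contains occ np) && !(vis.contains np) then
        (if it.2 == 1 then (acc.1 + 1, acc.2)
         else if it.2 == 2 then (acc.1, acc.2 + 1) else acc)
      else acc) acc =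
      pvDirsA.foldl (fun (acc : Int × Int) d =>
        if (!(PySem.Set.contains occ (pvNbrA it.1.1 it.1.2 d.1 d.2)) &&
            !(vis.contains (pvNbrA it.1.1 it.1.2 d.1 d.2))) then
          (acc.1 + (if it.2 = 1 then 1 else 0), acc.2 + (if it.2 = 2 then 1 else 0))
        else acc) acc := by
    apply List.foldl_ext
    intro a b _
    simp only []
    split
    · rw [hstep]
    · rfl
  rw [hext, pvPair_shift, pvDegA_eq_countP]
  rw [Prod.ext_iff]
  constructor <;> by_cases h1 : it.2 = 1 <;> by_cases h2 : it.2 = 2 <;>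
    simp [h1, h2] <;> omega

-- A's edge-counting double fold, split by owner
lemma pvEdges_eq (occ : PySem.Set (Int × Int)) (vis : PySem.Dict (Int × Int) Int) :
    ∀ (l : List ((Int × Int) × Int)) (acc : Int × Int),
      l.foldl (fun (acc : Int × Int) it =>
        pvDirsA.foldl (fun (acc : Int × Int) d =>
          let np := pvNbrA it.1.1 it.1.2 d.1 d.2
          if !(PySem.Set.contains occ np) && !(vis.contains np) then
            (if it.2 == 1 then (acc.1 + 1, acc.2)
             else if it.2 == 2 then (acc.1, acc.2 + 1) else acc)
          else acc) acc) acc =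
      (acc.1 + ((l.filter (fun e => e.2 == (1 : Int))).map (fun e => e.1)).foldl
          (fun (a : Int) c => a + pvDegA occ vis c) 0,
       acc.2 + ((l.filter (fun e => e.2 == (2 : Int))).map (fun e => e.1)).foldl
          (fun (a : Int) c => a + pvDegA occ vis c) 0) := by
  intro l
  induction l with
  | nil => intro acc; simp
  | cons it l ih =>
    intro acc
    rw [List.foldl_cons, pvInner_eq, ih]
    rw [List.filter_cons, List.filter_cons]
    by_cases h1 : it.2 = 1
    · have h2 : ¬ it.2 = 2 := by omega
      simp only [h1]
      norm_num
      first
        | (constructor <;> (rw [PySem.List.foldl_add, PySem.List.foldl_add]; ring))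
        | (rw [PySem.List.foldl_add, PySem.List.foldl_add]; ring)
    · by_cases h2 : it.2 = 2
      · simp only [h2]
        norm_num [h1]
        first
          | (constructor <;> (rw [PySem.List.foldl_add, PySem.List.foldl_add]; ring))
          | (rw [PySem.List.foldl_add, PySem.List.foldl_add]; ring)
      · have hb1 : (it.2 == (1 : Int)) = false := by simp [h1]
        have hb2 : (it.2 == (2 : Int)) = false := by simp [h2]
        simp [h1, h2, hb1, hb2]

-- ===== VERDICT (by name: the statement is the Claim_ definition above) =====
theorem calculate_voronoi_metrics_spec : Claim_equal_calculate_voronoi_metrics := by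
  unfold Claim_equal_calculate_voronoi_metrics Spec_calculate_voronoi_metrics
  intro t1 t2 _
  unfold calculate_voronoi_metrics calculate_voronoi_metrics_alt
  by_cases h : t1 = [] ∨ t2 = []
  · rw [dif_pos h, dif_pos h]
  · rw [dif_neg h, dif_neg h]
    dsimp only
    set a1 := t1.getLast (fun hh => h (Or.inl hh)) with ha1
    set a2 := t2.getLast (fun hh => h (Or.inr hh)) with ha2
    set occ := PySem.Set.union (PySem.Set.ofList t1) t2 with hocc
    set v0 := ((PySem.Dict.empty.insert a1 (1 : Int)).insert a2 2 : PySem.Dict (Int × Int) Int) with hv0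
    by_cases ha : a1 = a2
    · -- shared head: the dict holds a1 with owner 2, B's region1 starts empty
      have hseen : PySem.Set.ofList [a1, a2] = ([a1] : List (Int × Int)) := by
        rw [← ha, show ([a1, a1] : List (Int × Int)) = [a1] ++ [a1] from rfl,
          PySem.Set.ofList_append_singleton,
          PySem.Set.ofList_eq_self_of_nodup _ (by simp),
          PySem.Set.add_of_mem (by simp)]
      have hv0items : v0.items = [(a1, (2 : Int))] := by
        have hbase : (PySem.Dict.empty.insert a1 (1 : Int)).items = [(a1, (1 : Int))] := rfl
        rw [hv0, ← ha,
          PySem.Dict.items_insert_of_contains _ _ (PySem.Dict.contains_insert_self _ _ _), hbase]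
        simp
      have hkeys : v0.keys = PySem.Set.ofList [a1, a2] := by
        simp only [PySem.Dict.keys, hv0items, hseen]
        simp
      have hf1 : (v0.items.filter (fun e => e.2 == (1 : Int))).map (fun e => e.1) = ([] : List (Int × Int)) := by
        rw [hv0items]; simp
      have hf2 : (v0.items.filter (fun e => e.2 == (2 : Int))).map (fun e => e.1) = [a1] := by
        rw [hv0items]; simp
      obtain ⟨K, R1, R2⟩ := pvRounds_sim occ _ (PySem.Set.ofList [a1, a2]) [] [a1] [a1] [a2] v0
        rfl hkeys hf1 hf2
      simp only [List.map_cons, List.map_nil, List.cons_append, List.nil_append] at K R1 R2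
      simp only [if_pos ha]
      simp only [Prod.mk.injEq]
      refine ⟨?_, ?_, ?_, ?_⟩
      · congr 1
        rw [← R1]
        simp [PySem.Dict.values, List.filter_map, Function.comp_def]
      · congr 1
        rw [← R2]
        simp [PySem.Dict.values, List.filter_map, Function.comp_def]
      · have hedge := pvEdges_eq occ (pvLoopA occ v0 [(a1, 1), (a2, 2)])
          (pvLoopA occ v0 [(a1, 1), (a2, 2)]).items (0, 0)
        rw [R1, R2] at hedge
        rw [hedge]
        have hswap := List.foldl_ext
          (fun (a : Int) c => a + pvDegA occ (pvLoopA occ v0 [(a1, 1), (a2, 2)]) c)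
          (fun (a : Int) c => a + pvFreeDegB occ (pvRoundsB occ (PySem.Set.ofList [a1, a2]) [] [a1] [a1] [a2]).1 c)
          (0 : Int) (l := (pvRoundsB occ (PySem.Set.ofList [a1, a2]) [] [a1] [a1] [a2]).2.1)
          (fun a b _ => by simp only [pvDeg_congr occ _ _ K])
        rw [← hswap]
        simp
      · have hedge := pvEdges_eq occ (pvLoopA occ v0 [(a1, 1), (a2, 2)])
          (pvLoopA occ v0 [(a1, 1), (a2, 2)]).items (0, 0)
        rw [R1, R2] at hedge
        rw [hedge]
        have hswap := List.foldl_ext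
          (fun (a : Int) c => a + pvDegA occ (pvLoopA occ v0 [(a1, 1), (a2, 2)]) c)
          (fun (a : Int) c => a + pvFreeDegB occ (pvRoundsB occ (PySem.Set.ofList [a1, a2]) [] [a1] [a1] [a2]).1 c)
          (0 : Int) (l := (pvRoundsB occ (PySem.Set.ofList [a1, a2]) [] [a1] [a1] [a2]).2.2)
          (fun a b _ => by simp only [pvDeg_congr occ _ _ K])
        rw [← hswap]
        simp
    · -- distinct heads
      have hseen : PySem.Set.ofList [a1, a2] = ([a1, a2] : List (Int × Int)) :=
        PySem.Set.ofList_eq_self_of_nodup _ (by simp [ha])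
      have hc2 : (PySem.Dict.empty.insert a1 (1 : Int)).contains a2 = false := by
        rw [PySem.Dict.contains_insert]
        simp [Ne.symm ha, PySem.Dict.contains_empty]
      have hv0items : v0.items = [(a1, (1 : Int)), (a2, (2 : Int))] := by
        rw [hv0, PySem.Dict.items_insert_of_not_contains _ _ hc2]
        rfl
      have hkeys : v0.keys = PySem.Set.ofList [a1, a2] := by
        simp only [PySem.Dict.keys, hv0items, hseen]
        simp
      have hf1 : (v0.items.filter (fun e => e.2 == (1 : Int))).map (fun e => e.1) = [a1] := by
        rw [hv0items]; simp
      have hf2 : (v0.items.filter (fun e => e.2 == (2 : Int))).map (fun e => e.1) = [a2] := by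
        rw [hv0items]; simp
      obtain ⟨K, R1, R2⟩ := pvRounds_sim occ _ (PySem.Set.ofList [a1, a2]) [a1] [a2] [a1] [a2] v0
        rfl hkeys hf1 hf2
      simp only [List.map_cons, List.map_nil, List.cons_append, List.nil_append] at K R1 R2
      simp only [if_neg ha]
      simp only [Prod.mk.injEq]
      refine ⟨?_, ?_, ?_, ?_⟩
      · congr 1
        rw [← R1]
        simp [PySem.Dict.values, List.filter_map, Function.comp_def]
      · congr 1
        rw [← R2]
        simp [PySem.Dict.values, List.filter_map, Function.comp_def]
      · have hedge := pvEdges_eq occ (pvLoopA occ v0 [(a1, 1), (a2, 2)])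
          (pvLoopA occ v0 [(a1, 1), (a2, 2)]).items (0, 0)
        rw [R1, R2] at hedge
        rw [hedge]
        have hswap := List.foldl_ext
          (fun (a : Int) c => a + pvDegA occ (pvLoopA occ v0 [(a1, 1), (a2, 2)]) c)
          (fun (a : Int) c => a + pvFreeDegB occ (pvRoundsB occ (PySem.Set.ofList [a1, a2]) [a1] [a2] [a1] [a2]).1 c)
          (0 : Int) (l := (pvRoundsB occ (PySem.Set.ofList [a1, a2]) [a1] [a2] [a1] [a2]).2.1)
          (fun a b _ => by simp only [pvDeg_congr occ _ _ K])
        rw [← hswap]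
        simp
      · have hedge := pvEdges_eq occ (pvLoopA occ v0 [(a1, 1), (a2, 2)])
          (pvLoopA occ v0 [(a1, 1), (a2, 2)]).items (0, 0)
        rw [R1, R2] at hedge
        rw [hedge]
        have hswap := List.foldl_ext
          (fun (a : Int) c => a + pvDegA occ (pvLoopA occ v0 [(a1, 1), (a2, 2)]) c)
          (fun (a : Int) c => a + pvFreeDegB occ (pvRoundsB occ (PySem.Set.ofList [a1, a2]) [a1] [a2] [a1] [a2]).1 c)
          (0 : Int) (l := (pvRoundsB occ (PySem.Set.ofList [a1, a2]) [a1] [a2] [a1] [a2]).2.2)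
          (fun a b _ => by simp only [pvDeg_congr occ _ _ K])
        rw [← hswap]
        simp
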